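-- pv_equiv track=rewrite | github.com/Aguado4/UVa-problemas | 10057 A mid-sumer night's dream.py | eje
-- ===== SOURCE A (Python) =====
-- def busquedaBin(A,low,hi,v):
--     ans = -1
--     if low == hi:ans = -1
--     elif low + 1 == hi:
--         if A[hi] == v:ans = hi
--     else:
--         mid = (low + hi)// 2
--         if A[mid] >= v:ans = busquedaBin(A, low, mid, v)
--         else:ans = busquedaBin(A, mid, hi, v)
--     return ans
--
-- def absum(nums, val):
--     suma = 0
--     for i in nums:
--         suma += abs(i-val)
--     return suma
--
-- def eje(nums):
--     n = len(nums)
--     ind = n // 2 if n % 2 == 1 else (n//2)-1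
--     med = may = nums[ind]
--     ind = busquedaBin(nums,-1,n-1,med)
--     res = absum(nums,med) #restar med al ultimo valor que cumpla
--     cond, cont= ind, 0
--     while cond < n:
--         comp = absum(nums,nums[cond])
--         if nums[cond] == med or comp == res:
--             cont +=1
--             if nums[cond] > may: may = nums[cond]
--         else: cond += n
--         cond +=1
--     tot = may-med + 1
--     return(med, cont, tot)
-- ===== SOURCE B (Python) =====
-- def eje(nums):
--     n = len(nums)
--     # index the multiset once: for every value, how many elements are <= it and their sum;
--     # then each absolute-deviation sum is O(1) instead of a full O(n) pass
--     S = sorted(nums)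
--     total = 0
--     run = 0
--     pre = {}
--     for v in S:
--         run += 1
--         total += v
--         pre[v] = (run, total)
--
--     def dev(x):
--         c, s = pre[x]
--         return x * c - s + (total - s) - x * (n - c)
--
--     med = nums[(n - 1) // 2]
--     res = dev(med)
--
--     # locate the scan start the way A's bisection lands, iteratively
--     low, hi = -1, n - 1
--     while low != hi and low + 1 != hi:
--         mid = (low + hi) // 2
--         if nums[mid] >= med:
--             hi = mid
--         else:
--             low = mid
--     i = hi if low != hi and nums[hi] == med else -1
--
--     # the counted block is the maximal good run starting at i
--     k = i
--     while k < n and (nums[k] == med or dev(nums[k]) == res):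
--         k += 1
--     may = max([med] + [nums[j] for j in range(i, k)])
--     return (med, k - i, may - med + 1)
-- ===== Notes on version B (the rewrite author's own statement) =====
-- stated objective: faster
-- what changed: A recomputes the full O(n) absolute-deviation sum for every scanned candidate via absum and a recursive bisection; B sorts once and builds a value -> (count<=, prefix-sum) dict so each deviation sum is an O(1) lookup, locates the scan start with an iterative descent, and closes the counted block arithmetically with max() over the scanned slice.
import Mathlib
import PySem

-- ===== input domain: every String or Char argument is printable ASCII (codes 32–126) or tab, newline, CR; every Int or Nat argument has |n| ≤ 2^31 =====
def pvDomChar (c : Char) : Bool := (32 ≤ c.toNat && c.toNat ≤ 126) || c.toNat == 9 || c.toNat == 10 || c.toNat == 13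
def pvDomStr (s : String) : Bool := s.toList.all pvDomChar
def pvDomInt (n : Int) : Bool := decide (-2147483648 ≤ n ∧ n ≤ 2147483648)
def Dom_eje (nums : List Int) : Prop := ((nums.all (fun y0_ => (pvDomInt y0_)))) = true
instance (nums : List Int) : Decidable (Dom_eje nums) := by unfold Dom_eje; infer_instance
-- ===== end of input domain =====

-- B indexes the multiset once (sort + running count/sum per value) so each
-- absolute-deviation sum is an O(1) lookup instead of A's O(n) absum pass, finds the
-- scan start with an iterative descent, and closes the counted block arithmetically.

-- ===== PORT A =====
-- absum(nums, val): sum of abs(i - val)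
def absum (nums : List Int) (val : Int) : Int :=
  nums.foldl (fun suma i => suma + |i - val|) 0

-- busquedaBin(A, low, hi, v); the fuel only makes Python's recursion structural
-- (eje passes enough fuel for every call Python's eje makes)
def busquedaBin (A : List Int) : Nat → Int → Int → Int → Int
  | 0, _, _, _ => -1
  | fuel+1, low, hi, v =>
    if low = hi then -1
    else if low + 1 = hi then
      (if PySem.List.pyGetD A hi 0 = v then hi else -1)
    else
      let mid := PySem.Int.floordiv (low + hi) 2
      if PySem.List.pyGetD A mid 0 ≥ v then busquedaBin A fuel low mid v
      else busquedaBin A fuel mid hi v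

-- the while-loop of eje; state (cond, cont, may), fuel bounds the iteration count
def ejeLoop (nums : List Int) (n med res : Int) : Nat → Int → Int → Int → Int × Int
  | 0, _, cont, may => (cont, may)
  | fuel+1, cond, cont, may =>
    if cond < n then
      let comp := absum nums (PySem.List.pyGetD nums cond 0)
      if PySem.List.pyGetD nums cond 0 = med ∨ comp = res then
        ejeLoop nums n med res fuel (cond + 1) (cont + 1)
          (if PySem.List.pyGetD nums cond 0 > may then PySem.List.pyGetD nums cond 0 else may)
      else
        ejeLoop nums n med res fuel (cond + n + 1) cont may
    else (cont, may)

def eje (nums : List Int) : Int × Int × Int :=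
  let n : Int := PySem.List.len nums
  let ind : Int := if PySem.Int.mod n 2 = 1 then PySem.Int.floordiv n 2
                   else PySem.Int.floordiv n 2 - 1
  let med := PySem.List.pyGetD nums ind 0
  let ind2 := busquedaBin nums (nums.length + 1) (-1) (n - 1) med
  let res := absum nums med
  let cm := ejeLoop nums n med res (nums.length + 2) ind2 0 med
  (med, cm.1, cm.2 - med + 1)

-- ===== PORT B =====
-- the run/total/pre loop of Source B: one pass over the sorted copy
def preBuild (S : List Int) : Int × Int × PySem.Dict Int (Int × Int) :=
  S.foldl
    (fun st v => (st.1 + 1, st.2.1 + v, PySem.Dict.insert st.2.2 v (st.1 + 1, st.2.1 + v)))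
    (0, 0, PySem.Dict.empty)

-- dev(x) of Source B; the dict lookup is total here (Source B only queries keys present in pre)
def devB (pre : PySem.Dict Int (Int × Int)) (total n x : Int) : Int :=
  let cs := (PySem.Dict.get? pre x).getD (0, 0)
  x * cs.1 - cs.2 + (total - cs.2) - x * (n - cs.1)

-- the iterative bisection loop of Source B (fueled; eje_alt passes enough fuel)
def descend (nums : List Int) (med : Int) : Nat → Int → Int → Int × Int
  | 0, low, hi => (low, hi)
  | fuel+1, low, hi =>
    if low ≠ hi ∧ low + 1 ≠ hi then
      let mid := PySem.Int.floordiv (low + hi) 2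
      if PySem.List.pyGetD nums mid 0 ≥ med then descend nums med fuel low mid
      else descend nums med fuel mid hi
    else (low, hi)

-- the k-advancing while loop of Source B
def scanEnd (nums : List Int) (n med res : Int) (pre : PySem.Dict Int (Int × Int))
    (total : Int) : Nat → Int → Int
  | 0, k => k
  | fuel+1, k =>
    if k < n ∧ (PySem.List.pyGetD nums k 0 = med ∨
        devB pre total n (PySem.List.pyGetD nums k 0) = res) then
      scanEnd nums n med res pre total fuel (k + 1)
    else k

def eje_alt (nums : List Int) : Int × Int × Int :=
  let n : Int := PySem.List.len nums
  let st := preBuild (PySem.List.sorted nums (fun x => x) false)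
  let med := PySem.List.pyGetD nums (PySem.Int.floordiv (n - 1) 2) 0
  let res := devB st.2.2 st.2.1 n med
  let lh := descend nums med (nums.length + 1) (-1) (n - 1)
  let i := if lh.1 ≠ lh.2 ∧ PySem.List.pyGetD nums lh.2 0 = med then lh.2 else -1
  let k := scanEnd nums n med res st.2.2 st.2.1 (nums.length + 2) i
  let may := (PySem.List.max?
    (med :: (PySem.List.pyRange i k 1).map (fun j => PySem.List.pyGetD nums j 0))
    (fun x => x)).getD 0
  (med, k - i, may - med + 1)

-- ===== PRECONDITION & SPEC =====
-- Pre_ excludes only the empty list, on which A raises IndexError.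
def Pre_eje (nums : List Int) : Prop := nums ≠ []
instance (nums : List Int) : Decidable (Pre_eje nums) := by unfold Pre_eje; infer_instance
def pvWitness_eje : List Int := [1, 2, 2, 5]

def Spec_eje (nums : List Int) (out : Int × Int × Int) : Prop := out = eje_alt nums
instance (nums : List Int) (out : Int × Int × Int) : Decidable (Spec_eje nums out) := by unfold Spec_eje; infer_instance

-- ===== CLAIM (what is proved, stated in full; the proofs are below) =====
def Claim_equal_eje : Prop := ∀ (nums : List Int), Dom_eje nums → Pre_eje nums → Spec_eje nums (eje nums)

-- ===== LEMMAS AND PROOFS =====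

lemma absum_foldl (xs : List Int) (v a : Int) :
    xs.foldl (fun suma i => suma + |i - v|) a = a + absum xs v := by
  induction xs generalizing a with
  | nil => simp only [absum, List.foldl_nil]; omega
  | cons x xs ih =>
    simp only [absum, List.foldl_cons, zero_add]
    rw [ih, ih]; ring

lemma absum_cons (x : Int) (xs : List Int) (v : Int) :
    absum (x :: xs) v = |x - v| + absum xs v := by
  simp only [absum, List.foldl_cons, zero_add]
  rw [absum_foldl]; rfl

-- absum written through the (count, sum) split at x
lemma absum_formula (L : List Int) (x : Int) :
    absum L x = x * (L.countP (fun y => y ≤ x) : Int) - (L.filter (fun y => y ≤ x)).sum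
      + (L.sum - (L.filter (fun y => y ≤ x)).sum)
      - x * ((L.length : Int) - (L.countP (fun y => y ≤ x) : Int)) := by
  induction L with
  | nil => simp [absum]
  | cons y L ih =>
    rw [absum_cons, ih, List.countP_cons, List.length_cons, List.filter_cons, List.sum_cons]
    by_cases h : y ≤ x
    · rw [abs_of_nonpos (by omega)]
      simp only [h, decide_true, if_pos, List.sum_cons]
      push_cast; ring
    · rw [abs_of_nonneg (by omega)]
      simp only [h, decide_false]
      rw [if_neg (by simp)]
      push_cast; ring

-- the dict built by Source B's first loop: value ↦ (count ≤ value, sum of those), over sorted S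
lemma preBuild_spec (S : List Int) (hs : List.Pairwise (· ≤ ·) S) :
    (preBuild S).1 = (S.length : Int) ∧ (preBuild S).2.1 = S.sum ∧
    ∀ x ∈ S, PySem.Dict.get? (preBuild S).2.2 x
      = some ((S.countP (fun y => y ≤ x) : Int), (S.filter (fun y => y ≤ x)).sum) := by
  induction S using List.reverseRecOn with
  | nil => simp [preBuild, PySem.Dict.empty]
  | append_singleton T v ih =>
    have hT : List.Pairwise (· ≤ ·) T := (List.pairwise_append.mp hs).1
    have hle : ∀ y ∈ T, y ≤ v := by
      intro y hy
      exact (List.pairwise_append.mp hs).2.2 y hy v (by simp)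
    obtain ⟨h1, h2, h3⟩ := ih hT
    have hstep : preBuild (T ++ [v])
        = ((preBuild T).1 + 1, (preBuild T).2.1 + v,
           PySem.Dict.insert (preBuild T).2.2 v ((preBuild T).1 + 1, (preBuild T).2.1 + v)) := by
      simp [preBuild, List.foldl_append]
    have hcntv : T.countP (fun y => y ≤ v) = T.length :=
      List.countP_eq_length.mpr (fun a ha => decide_eq_true (hle a ha))
    have hfilv : T.filter (fun y => y ≤ v) = T :=
      List.filter_eq_self.mpr (fun a ha => decide_eq_true (hle a ha))
    refine ⟨?_, ?_, ?_⟩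
    · rw [hstep]; simp [h1]
    · rw [hstep]; simp [h2]
    · intro x hx
      rw [hstep]
      by_cases hxv : x = v
      · subst hxv
        rw [PySem.Dict.get?_insert_self]
        rw [List.countP_append, List.filter_append, List.sum_append, hcntv, hfilv, h1, h2]
        have e1 : List.countP (fun y => y ≤ x) [x] = 1 := by simp
        have e2 : List.filter (fun y => y ≤ x) [x] = [x] := by simp
        rw [e1, e2]
        refine congrArg some (Prod.ext ?_ ?_) <;> simp
      · have hxT : x ∈ T := by
          rcases List.mem_append.mp hx with h | h
          · exact h
          · simp at h; exact absurd h hxv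
        rw [PySem.Dict.get?_insert_of_ne _ _ hxv]
        rw [List.countP_append, List.filter_append, List.sum_append]
        have hvx : ¬ (v ≤ x) := by
          have := hle x hxT
          intro hcon
          exact hxv (le_antisymm this hcon)
        have hc : List.countP (fun y => y ≤ x) [v] = 0 := by simp [hvx]
        have hf : List.filter (fun y => y ≤ x) [v] = [] := by simp [hvx]
        rw [hc, hf, h3 x hxT]
        simp

-- Source B's dev agrees with A's absum on every member of nums
lemma dev_eq_absum (nums : List Int) (x : Int) (hx : x ∈ nums) :
    devB (preBuild (PySem.List.sorted nums (fun x => x) false)).2.2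
        (preBuild (PySem.List.sorted nums (fun x => x) false)).2.1
        (nums.length : Int) x
      = absum nums x := by
  set S := PySem.List.sorted nums (fun x => x) false with hS
  have hperm : S.Perm nums := PySem.List.sorted_perm nums (fun x => x) false
  have hpair : List.Pairwise (· ≤ ·) S := PySem.List.sorted_pairwise nums (fun x => x)
  obtain ⟨h1, h2, h3⟩ := preBuild_spec S hpair
  have hxS : x ∈ S := (PySem.List.mem_sorted nums (fun x => x) false x).mpr hx
  simp only [devB]
  rw [h3 x hxS]
  simp only [Option.getD_some]
  rw [h2, hperm.countP_eq, (hperm.filter (fun y => y ≤ x)).sum_eq, hperm.sum_eq,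
    absum_formula nums x]

-- A's recursive bisection equals Source B's iterative descent plus the final check
lemma busq_eq_descend (nums : List Int) (v : Int) :
    ∀ (fuel : Nat) (low hi : Int), low < hi → (hi - low).toNat ≤ fuel →
      busquedaBin nums fuel low hi v
        = (if (descend nums v fuel low hi).1 ≠ (descend nums v fuel low hi).2 ∧
              PySem.List.pyGetD nums (descend nums v fuel low hi).2 0 = v
           then (descend nums v fuel low hi).2 else -1) := by
  intro fuel
  induction fuel with
  | zero => intro low hi h1 h2; exfalso; omega
  | succ f ih =>
    intro low hi h1 h2
    by_cases hadj : low + 1 = hi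
    · have hD : descend nums v (f+1) low hi = (low, hi) := by
        simp only [descend]
        rw [if_neg (by omega)]
      rw [hD]
      simp only [busquedaBin]
      rw [if_neg (by omega : ¬ low = hi), if_pos hadj]
      by_cases hv : PySem.List.pyGetD nums hi 0 = v
      · rw [if_pos hv, if_pos ⟨by omega, hv⟩]
      · rw [if_neg hv, if_neg (fun hcon => hv hcon.2)]
    · set mid := PySem.Int.floordiv (low + hi) 2 with hmiddef
      have hmid : mid = (low + hi) / 2 := PySem.Int.floordiv_eq_ediv_of_pos (by norm_num)
      have hb : low + 1 ≤ mid ∧ mid ≤ hi - 1 := by rw [hmid]; omega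
      by_cases hc : PySem.List.pyGetD nums mid 0 ≥ v
      · have hD : descend nums v (f+1) low hi = descend nums v f low mid := by
          simp only [descend]
          rw [if_pos ⟨by omega, hadj⟩, ← hmiddef, if_pos hc]
        have hB : busquedaBin nums (f+1) low hi v = busquedaBin nums f low mid v := by
          simp only [busquedaBin]
          rw [if_neg (by omega : ¬ low = hi), if_neg hadj, ← hmiddef, if_pos hc]
        rw [hB, hD]
        exact ih low mid (by omega) (by omega)
      · have hD : descend nums v (f+1) low hi = descend nums v f mid hi := by
          simp only [descend]
          rw [if_pos ⟨by omega, hadj⟩, ← hmiddef, if_neg hc]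
        have hB : busquedaBin nums (f+1) low hi v = busquedaBin nums f mid hi v := by
          simp only [busquedaBin]
          rw [if_neg (by omega : ¬ low = hi), if_neg hadj, ← hmiddef, if_neg hc]
        rw [hB, hD]
        exact ih mid hi (by omega) (by omega)

-- the descent stays inside its interval
lemma descend_bounds (nums : List Int) (v : Int) :
    ∀ (fuel : Nat) (low hi : Int), low ≤ hi →
      low ≤ (descend nums v fuel low hi).1 ∧
      (descend nums v fuel low hi).1 ≤ (descend nums v fuel low hi).2 ∧
      (descend nums v fuel low hi).2 ≤ hi := by
  intro fuel
  induction fuel with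
  | zero => intro low hi h; exact ⟨le_refl _, h, le_refl _⟩
  | succ f ih =>
    intro low hi h
    by_cases hg : low ≠ hi ∧ low + 1 ≠ hi
    · have hlh : low < hi := lt_of_le_of_ne h hg.1
      set mid := PySem.Int.floordiv (low + hi) 2 with hmiddef
      have hmid : mid = (low + hi) / 2 := PySem.Int.floordiv_eq_ediv_of_pos (by norm_num)
      have hb : low ≤ mid ∧ mid ≤ hi := by rw [hmid]; omega
      by_cases hc : PySem.List.pyGetD nums mid 0 ≥ v
      · have hD : descend nums v (f+1) low hi = descend nums v f low mid := by
          simp only [descend]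
          rw [if_pos hg, ← hmiddef, if_pos hc]
        rw [hD]
        obtain ⟨a1, a2, a3⟩ := ih low mid hb.1
        exact ⟨a1, a2, le_trans a3 hb.2⟩
      · have hD : descend nums v (f+1) low hi = descend nums v f mid hi := by
          simp only [descend]
          rw [if_pos hg, ← hmiddef, if_neg hc]
        rw [hD]
        obtain ⟨a1, a2, a3⟩ := ih mid hi hb.2
        exact ⟨le_trans hb.1 a1, a2, a3⟩
    · have hD : descend nums v (f+1) low hi = (low, hi) := by
        simp only [descend]
        rw [if_neg hg]
      rw [hD]
      exact ⟨le_refl _, h, le_refl _⟩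

-- Source B's boundary k never moves backwards
lemma scanEnd_ge (nums : List Int) (n med res : Int) (pre : PySem.Dict Int (Int × Int))
    (total : Int) : ∀ (fuel : Nat) (k : Int),
      k ≤ scanEnd nums n med res pre total fuel k := by
  intro fuel
  induction fuel with
  | zero => intro k; exact le_refl _
  | succ f ih =>
    intro k
    simp only [scanEnd]
    split
    · exact le_trans (by omega) (ih (k + 1))
    · exact le_refl _

-- A's while loop, against Source B's boundary scan: it counts k - cond elements and
-- folds the running maximum over exactly the scanned positions
lemma loop_sync (nums : List Int) (med res : Int) (pre : PySem.Dict Int (Int × Int))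
    (total : Int)
    (hgood : ∀ c : Int, -1 ≤ c → c < (nums.length : Int) →
      (absum nums (PySem.List.pyGetD nums c 0) =
        devB pre total (nums.length : Int) (PySem.List.pyGetD nums c 0))) :
    ∀ (fuel : Nat) (cond cont may : Int), -1 ≤ cond →
      ((nums.length : Int) - cond).toNat + 1 ≤ fuel →
      ejeLoop nums (nums.length : Int) med res fuel cond cont may
        = (cont + (scanEnd nums (nums.length : Int) med res pre total fuel cond - cond),
           ((PySem.List.pyRange cond (scanEnd nums (nums.length : Int) med res pre total fuel cond) 1).map
              (fun j => PySem.List.pyGetD nums j 0)).foldl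
             (fun m x => if x > m then x else m) may) := by
  intro fuel
  induction fuel with
  | zero => intro cond cont may h1 h2; exfalso; omega
  | succ f ih =>
    intro cond cont may h1 h2
    by_cases hcn : cond < (nums.length : Int)
    · by_cases hg : PySem.List.pyGetD nums cond 0 = med ∨
          absum nums (PySem.List.pyGetD nums cond 0) = res
      · have hgB : PySem.List.pyGetD nums cond 0 = med ∨
            devB pre total (nums.length : Int) (PySem.List.pyGetD nums cond 0) = res := by
          rw [← hgood cond h1 hcn]; exact hg
        have hS : scanEnd nums (nums.length : Int) med res pre total (f+1) cond
            = scanEnd nums (nums.length : Int) med res pre total f (cond + 1) := by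
          simp only [scanEnd]
          rw [if_pos ⟨hcn, hgB⟩]
        have hL : ejeLoop nums (nums.length : Int) med res (f+1) cond cont may
            = ejeLoop nums (nums.length : Int) med res f (cond + 1) (cont + 1)
              (if PySem.List.pyGetD nums cond 0 > may then PySem.List.pyGetD nums cond 0
               else may) := by
          simp only [ejeLoop]
          rw [if_pos hcn, if_pos hg]
        rw [hL, hS, ih (cond + 1) (cont + 1) _ (by omega) (by omega)]
        have hK := scanEnd_ge nums (nums.length : Int) med res pre total f (cond + 1)
        rw [PySem.List.pyRange_one_cons (by omega :
          cond < scanEnd nums (nums.length : Int) med res pre total f (cond + 1))]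
        rw [List.map_cons, List.foldl_cons]
        refine Prod.ext (by push_cast; ring) rfl
      · have hS : scanEnd nums (nums.length : Int) med res pre total (f+1) cond = cond := by
          simp only [scanEnd]
          rw [if_neg (by
            intro hcon
            apply hg
            rcases hcon.2 with h | h
            · exact Or.inl h
            · exact Or.inr (by rw [hgood cond h1 hcn]; exact h))]
        have hL : ejeLoop nums (nums.length : Int) med res (f+1) cond cont may
            = ejeLoop nums (nums.length : Int) med res f (cond + (nums.length : Int) + 1)
              cont may := by
          simp only [ejeLoop]
          rw [if_pos hcn, if_neg hg]
        rw [hL, hS]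
        have hf1 : 1 ≤ f := by omega
        have hL2 : ejeLoop nums (nums.length : Int) med res f
            (cond + (nums.length : Int) + 1) cont may = (cont, may) := by
          match f, hf1 with
          | g+1, _ =>
            simp only [ejeLoop]
            rw [if_neg (by omega)]
        rw [hL2, PySem.List.pyRange_one_eq_nil (by omega)]
        refine Prod.ext (by push_cast; ring) rfl
    · have hS : scanEnd nums (nums.length : Int) med res pre total (f+1) cond = cond := by
        simp only [scanEnd]
        rw [if_neg (fun hcon => hcn hcon.1)]
      have hL : ejeLoop nums (nums.length : Int) med res (f+1) cond cont may
          = (cont, may) := by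
        simp only [ejeLoop]
        rw [if_neg hcn]
      rw [hL, hS, PySem.List.pyRange_one_eq_nil (by omega)]
      refine Prod.ext (by push_cast; ring) rfl

-- Python's max over a nonempty list is A's strict-improvement fold
lemma max_fold (L : List Int) : ∀ (a : Int),
    (PySem.List.max? (a :: L) (fun x => x)).getD 0
      = L.foldl (fun m x => if x > m then x else m) a := by
  induction L with
  | nil => intro a; rfl
  | cons x L ih =>
    intro a
    have hstep : PySem.List.max? (a :: x :: L) (fun y => y)
        = PySem.List.max? ((if x > a then x else a) :: L) (fun y => y) := by
      show List.foldl _ (some a) (x :: L) = List.foldl _ (some (if x > a then x else a)) L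
      rw [List.foldl_cons]
      congr 1
      show (if a < x then some x else some a) = some (if x > a then x else a)
      by_cases h : a < x
      · rw [if_pos h, if_pos h]
      · rw [if_neg h, if_neg h]
    rw [List.foldl_cons, hstep, ih]

-- ===== VERDICT (by name: the statement is the Claim_ definition above) =====
theorem eje_spec : Claim_equal_eje := by
  unfold Claim_equal_eje
  intro nums _ hne
  unfold Spec_eje
  have hn : 0 < nums.length := List.length_pos_of_ne_nil hne
  set n := nums.length with hn_def
  set S := PySem.List.sorted nums (fun x => x) false with hS_def
  set st := preBuild S with hst_def
  -- the two median expressions agree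
  have hind : (if PySem.Int.mod (n : Int) 2 = 1 then PySem.Int.floordiv (n : Int) 2
      else PySem.Int.floordiv (n : Int) 2 - 1) = PySem.Int.floordiv ((n : Int) - 1) 2 := by
    rw [PySem.Int.mod_eq_emod_of_pos (by norm_num),
      PySem.Int.floordiv_eq_ediv_of_pos (by norm_num),
      PySem.Int.floordiv_eq_ediv_of_pos (by norm_num)]
    split_ifs with h <;> omega
  set med := PySem.List.pyGetD nums (PySem.Int.floordiv ((n : Int) - 1) 2) 0 with hmed_def
  -- dev = absum on members, hence at every in-range index
  have hgood : ∀ c : Int, -1 ≤ c → c < (n : Int) →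
      absum nums (PySem.List.pyGetD nums c 0)
        = devB st.2.2 st.2.1 (n : Int) (PySem.List.pyGetD nums c 0) := by
    intro c h1 h2
    have hmem : PySem.List.pyGetD nums c 0 ∈ nums := by
      apply PySem.List.pyGetD_mem
      simp only [PySem.Raise.InRange]
      omega
    exact (dev_eq_absum nums _ hmem).symm
  -- res agrees
  have hmem_med : med ∈ nums := by
    apply PySem.List.pyGetD_mem
    have : PySem.Int.floordiv ((n : Int) - 1) 2 = ((n : Int) - 1) / 2 :=
      PySem.Int.floordiv_eq_ediv_of_pos (by norm_num)
    simp only [PySem.Raise.InRange]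
    omega
  have hres : absum nums med = devB st.2.2 st.2.1 (n : Int) med :=
    (dev_eq_absum nums med hmem_med).symm
  -- the scan start agrees
  have hbusq := busq_eq_descend nums med (n + 1) (-1) ((n : Int) - 1) (by omega) (by omega)
  set lh := descend nums med (n + 1) (-1) ((n : Int) - 1) with hlh_def
  set i := if lh.1 ≠ lh.2 ∧ PySem.List.pyGetD nums lh.2 0 = med then lh.2 else -1 with hi_def
  have hlhb := descend_bounds nums med (n + 1) (-1) ((n : Int) - 1) (by omega)
  rw [← hlh_def] at hlhb
  have hi_ge : -1 ≤ i := by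
    rw [hi_def]
    split
    · omega
    · omega
  -- evaluate both sides
  show eje nums = eje_alt nums
  rw [eje, eje_alt]
  simp only [PySem.List.len_eq, ← hn_def, ← hS_def, ← hst_def, hind, ← hmed_def,
    ← hlh_def, ← hi_def]
  rw [hbusq, hres]
  rw [loop_sync nums med (devB st.2.2 st.2.1 (n : Int) med) st.2.2 st.2.1
    (fun c h1 h2 => hgood c h1 h2) (n + 2) i 0 med hi_ge (by omega)]
  rw [max_fold]
  refine Prod.ext rfl (Prod.ext (by push_cast; ring) rfl)
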